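-- pv_equiv track=rewrite | github.com/Echooff3/azure-musicgen-tools | arm-templates/validate-template.py | check_api_versions
-- ===== SOURCE A (Python) =====
-- def check_api_versions(template):
--     """Check resource API versions."""
--     resources = template.get('resources', [])
--     api_info = {}
--
--     for resource in resources:
--         resource_type = resource.get('type', 'Unknown')
--         api_version = resource.get('apiVersion', 'Missing')
--
--         if resource_type not in api_info:
--             api_info[resource_type] = []
--         if api_version not in api_info[resource_type]:
--             api_info[resource_type].append(api_version)
--
--     return api_info
-- ===== SOURCE B (Python) =====
-- def check_api_versions(template):
--     """Check resource API versions."""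
--     resources = template.get('resources', [])
--     # distinct resource types, first-seen order
--     types = list(dict.fromkeys(r.get('type', 'Unknown') for r in resources))
--     # for each type, one scan collecting its versions, deduped in first-seen order
--     return {t: list(dict.fromkeys(r.get('apiVersion', 'Missing')
--                                   for r in resources
--                                   if r.get('type', 'Unknown') == t))
--             for t in types}
-- ===== Notes on version B (the rewrite author's own statement) =====
-- stated objective: alternative
-- what changed: A builds a dict incrementally in one loop with per-resource membership tests; B never builds a dict incrementally: it first lists the distinct types, then for each type rescans the resources collecting that type's versions and dedups them with dict.fromkeys (group-by-rescan instead of incremental dict).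
import Mathlib
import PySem

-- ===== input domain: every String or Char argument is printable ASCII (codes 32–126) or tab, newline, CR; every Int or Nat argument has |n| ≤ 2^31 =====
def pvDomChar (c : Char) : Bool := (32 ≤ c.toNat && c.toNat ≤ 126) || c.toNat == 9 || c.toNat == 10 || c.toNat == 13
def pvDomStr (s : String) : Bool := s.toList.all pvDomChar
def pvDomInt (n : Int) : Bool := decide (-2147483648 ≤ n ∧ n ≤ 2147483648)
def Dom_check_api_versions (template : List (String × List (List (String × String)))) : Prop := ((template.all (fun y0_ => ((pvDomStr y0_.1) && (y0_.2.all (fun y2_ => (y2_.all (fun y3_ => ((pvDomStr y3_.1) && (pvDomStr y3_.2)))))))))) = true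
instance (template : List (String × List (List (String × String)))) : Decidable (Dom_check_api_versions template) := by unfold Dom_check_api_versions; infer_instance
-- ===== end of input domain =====

-- B change (objective 'alternative'): A builds a dict incrementally in one loop with membership
-- tests; B instead lists the distinct types and, per type, rescans the resources and dedups that
-- type's versions (group-by-rescan, no incremental dict).  Return values proved equal everywhere.

-- ===== PORT A =====
-- dict.get(k, dflt) on an association list: first match, else default (exact under the convention)
def pvResGet (r : List (String × String)) (k dflt : String) : String :=
  ((r.find? (fun p => p.1 == k)).map (·.2)).getD dflt

-- the body of A's loop, as a named helper
def aStep (d : PySem.Dict String (List String)) (resource : List (String × String)) :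
    PySem.Dict String (List String) :=
  let rt := pvResGet resource "type" "Unknown"
  let av := pvResGet resource "apiVersion" "Missing"
  let d1 := if d.contains rt then d else d.insert rt []
  if (d1.getD rt []).contains av then d1 else d1.insert rt (d1.getD rt [] ++ [av])

def check_api_versions (template : List (String × List (List (String × String)))) :
    List (String × List String) :=
  let resources := ((template.find? (fun p => p.1 == "resources")).map (·.2)).getD []
  (resources.foldl aStep PySem.Dict.empty).items

-- ===== PORT B =====
def check_api_versions_alt (template : List (String × List (List (String × String)))) :
    List (String × List String) :=
  let resources := ((template.find? (fun p => p.1 == "resources")).map (·.2)).getD []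
  let types := PySem.List.dedup (resources.map (fun r => pvResGet r "type" "Unknown"))
  types.map (fun t =>
    (t, PySem.List.dedup
          ((resources.filter (fun r => pvResGet r "type" "Unknown" == t)).map
            (fun r => pvResGet r "apiVersion" "Missing"))))

-- ===== PRECONDITION & SPEC =====
def Spec_check_api_versions (template : List (String × List (List (String × String)))) (out : List (String × List String)) : Prop := out = check_api_versions_alt template
instance (template : List (String × List (List (String × String)))) (out : List (String × List String)) : Decidable (Spec_check_api_versions template out) := by unfold Spec_check_api_versions; infer_instance

-- ===== CLAIM (what is proved, stated in full; the proofs are below) =====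
def Claim_equal_check_api_versions : Prop := ∀ (template : List (String × List (List (String × String)))), Dom_check_api_versions template → Spec_check_api_versions template (check_api_versions template)

-- ===== LEMMAS AND PROOFS =====

theorem aStep_getD (d : PySem.Dict String (List String)) (r : List (String × String)) (c : String) :
    (aStep d r).getD c [] =
      if pvResGet r "type" "Unknown" = c
      then PySem.Set.add (d.getD c []) (pvResGet r "apiVersion" "Missing")
      else d.getD c [] := by
  unfold aStep
  set rt := pvResGet r "type" "Unknown" with hrt
  set av := pvResGet r "apiVersion" "Missing" with hav
  have hd1 : (if d.contains rt then d else d.insert rt []).getD rt [] = d.getD rt [] := by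
    by_cases h : d.contains rt
    · rw [if_pos h]
    · rw [if_neg h, PySem.Dict.getD_insert_self,
        PySem.Dict.getD_of_not_contains d [] (by simpa using h)]
  by_cases hc : rt = c
  · subst hc
    rw [if_pos rfl]
    by_cases hm : ((if d.contains rt then d else d.insert rt []).getD rt []).contains av
    · rw [if_pos hm, hd1]
      rw [hd1] at hm
      rw [PySem.Set.add_of_mem (by simpa using hm)]
    · rw [if_neg hm, PySem.Dict.getD_insert_self, hd1]
      rw [hd1] at hm
      rw [PySem.Set.add_of_not_mem (by simpa using hm)]
  · rw [if_neg hc]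
    have hne : c ≠ rt := fun h => hc h.symm
    have h2 : (if d.contains rt then d else d.insert rt ([] : List String)).getD c [] = d.getD c [] := by
      by_cases h : d.contains rt
      · rw [if_pos h]
      · rw [if_neg h, PySem.Dict.getD_insert_of_ne d [] [] hne]
    by_cases hm : ((if d.contains rt then d else d.insert rt []).getD rt []).contains av
    · rw [if_pos hm, h2]
    · rw [if_neg hm, PySem.Dict.getD_insert_of_ne _ _ [] hne, h2]

theorem aStep_keys (d : PySem.Dict String (List String)) (r : List (String × String)) :
    (aStep d r).keys = PySem.Set.add d.keys (pvResGet r "type" "Unknown") := by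
  unfold aStep
  dsimp only
  set rt := pvResGet r "type" "Unknown" with hrt
  set av := pvResGet r "apiVersion" "Missing" with hav
  by_cases h : d.contains rt
  · have hk : rt ∈ d.keys := (PySem.Dict.contains_iff_mem_keys d rt).1 h
    rw [if_pos h, PySem.Set.add_of_mem hk]
    by_cases hm : (d.getD rt []).contains av
    · rw [if_pos hm]
    · rw [if_neg hm, PySem.Dict.keys_insert_of_contains d _ h]
  · have hk : rt ∉ d.keys := fun hm => h ((PySem.Dict.contains_iff_mem_keys d rt).2 hm)
    rw [if_neg h, PySem.Set.add_of_not_mem hk]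
    by_cases hm : ((d.insert rt ([] : List String)).getD rt []).contains av
    · rw [if_pos hm, PySem.Dict.keys_insert_of_not_contains d [] (by simpa using h)]
    · rw [if_neg hm,
        PySem.Dict.keys_insert_of_contains _ _ (PySem.Dict.contains_insert_self d rt []),
        PySem.Dict.keys_insert_of_not_contains d [] (by simpa using h)]

theorem afold_getD (l : List (List (String × String))) (d : PySem.Dict String (List String)) (c : String) :
    (l.foldl aStep d).getD c [] =
      PySem.Set.update (d.getD c [])
        ((l.filter (fun r => pvResGet r "type" "Unknown" == c)).map
          (fun r => pvResGet r "apiVersion" "Missing")) := by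
  induction l generalizing d with
  | nil => simp [PySem.Set.update]
  | cons r rs ih =>
    rw [List.foldl_cons, ih, List.filter_cons]
    by_cases hc : pvResGet r "type" "Unknown" = c
    · rw [if_pos (by simpa using hc), List.map_cons, PySem.Set.update_cons,
        aStep_getD, if_pos hc]
    · rw [if_neg (by simpa using hc), aStep_getD, if_neg hc]

theorem afold_keys (l : List (List (String × String))) (d : PySem.Dict String (List String)) :
    (l.foldl aStep d).keys =
      PySem.Set.update d.keys (l.map (fun r => pvResGet r "type" "Unknown")) := by
  induction l generalizing d with
  | nil => simp [PySem.Set.update]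
  | cons r rs ih =>
    rw [List.foldl_cons, ih, List.map_cons, PySem.Set.update_cons, aStep_keys]

-- ===== VERDICT (by name: the statement is the Claim_ definition above) =====
theorem check_api_versions_spec : Claim_equal_check_api_versions := by
  intro template _
  unfold Spec_check_api_versions check_api_versions check_api_versions_alt
  dsimp only
  set l := ((template.find? (fun p => p.1 == "resources")).map (·.2)).getD [] with hl
  have hakeys : (l.foldl aStep PySem.Dict.empty).keys =
      PySem.Set.ofList (l.map (fun r => pvResGet r "type" "Unknown")) := by
    rw [afold_keys]
    simp [PySem.Dict.keys_empty, PySem.Set.update_nil_left]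
  have hand : (l.foldl aStep PySem.Dict.empty).keys.Nodup := by
    rw [hakeys]; exact PySem.Set.nodup_ofList _
  rw [PySem.Dict.items_eq_map_keys _ hand ([] : List String), hakeys,
    PySem.List.dedup_eq_ofList]
  apply List.map_congr_left
  intro c _
  rw [afold_getD, PySem.List.dedup_eq_ofList]
  simp [PySem.Dict.getD_empty, PySem.Set.update_nil_left]
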